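-- pv_equiv track=rewrite | github.com/Vans698/EGE | номер_25.py | dell
-- ===== SOURCE A (Python) =====
-- def dell(x):
--   d = []
--   for i in range(2, int(x**0.5)+1):
--     if x%i == 0:
--       if i%2 != 0:
--         d.append(i)
--       if i != x//i:
--         if (x//i)%2 != 0:
--           d.append(x//i)
--   return sorted(d)
-- ===== SOURCE B (Python) =====
-- def dell(x):
--   if x <= 0:
--     return []
--   m = x
--   while m % 2 == 0:
--     m //= 2
--   small = []
--   big = []
--   i = 1
--   while i * i <= m:
--     if m % i == 0:
--       small.append(i)
--       if i * i != m:
--         big.append(m // i)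
--     i += 1
--   divs = small + big[::-1]
--   return [d for d in divs if d != 1 and d != x]
-- ===== Notes on version B (the rewrite author's own statement) =====
-- stated objective: alternative
-- what changed: B first strips the even part of x, then enumerates all divisors of the odd remainder m with a paired scan to sqrt(m) kept in ascending order by construction (small divisors up, co-divisors reversed), and finally filters out 1 and x; A instead scans 2..sqrt(x) over x itself with parity tests on each divisor and co-divisor and sorts at the end.
import Mathlib
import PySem

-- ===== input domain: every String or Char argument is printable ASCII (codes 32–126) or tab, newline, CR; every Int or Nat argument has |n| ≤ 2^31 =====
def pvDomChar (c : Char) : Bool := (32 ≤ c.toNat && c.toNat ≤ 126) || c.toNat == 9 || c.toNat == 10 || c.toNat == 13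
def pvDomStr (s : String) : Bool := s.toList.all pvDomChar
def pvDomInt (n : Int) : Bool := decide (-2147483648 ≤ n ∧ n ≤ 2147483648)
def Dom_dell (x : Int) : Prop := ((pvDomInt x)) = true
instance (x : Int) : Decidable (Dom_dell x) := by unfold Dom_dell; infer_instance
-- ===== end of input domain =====

-- B strips the even part of x and enumerates all divisors of the odd remainder in ascending
-- order by construction (no parity tests, no sort), then filters out 1 and x (alternative).

-- ===== PORT A =====
-- int(x**0.5) is ported as Nat.sqrt x.toNat: exact for 0 ≤ x ≤ 2^31 (float sqrt rounds to the
-- integer square root there); for x < 0 Python raises TypeError, excluded by Pre_dell.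
def dell (x : Int) : List Int :=
  let d : List Int :=
    (PySem.List.pyRange 2 (((Nat.sqrt x.toNat : Nat) : Int) + 1) 1).foldl
      (fun d i =>
        if PySem.Int.mod x i = 0 then
          let d := if PySem.Int.mod i 2 ≠ 0 then d ++ [i] else d
          if i ≠ PySem.Int.floordiv x i then
            if PySem.Int.mod (PySem.Int.floordiv x i) 2 ≠ 0 then d ++ [PySem.Int.floordiv x i]
            else d
          else d
        else d) []
  PySem.List.sorted d (fun a => a)

-- ===== PORT B =====
-- 'while m % 2 == 0: m //= 2'; the conjunct 1 <= m only makes the recursion total (B is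
-- called with m >= 1, where it is Python's loop condition exactly)
def stripTwos (m : Int) : Int :=
  if h : 1 ≤ m ∧ PySem.Int.mod m 2 = 0 then stripTwos (PySem.Int.floordiv m 2) else m
termination_by m.toNat
decreasing_by
  rw [PySem.Int.floordiv_eq_ediv_of_pos (by norm_num : (0:Int) < 2)]
  rw [PySem.Int.mod_eq_emod_of_pos (by norm_num : (0:Int) < 2)] at h
  omega

-- 'while i * i <= m: …'; the conjunct 1 <= i only makes the recursion total (B starts the
-- loop at i = 1, where it is Python's loop condition exactly)
def pairLoop (m i : Int) (small big : List Int) : List Int × List Int :=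
  if h : i * i ≤ m ∧ 1 ≤ i then
    if PySem.Int.mod m i = 0 then
      let small := small ++ [i]
      let big := if i * i ≠ m then big ++ [PySem.Int.floordiv m i] else big
      pairLoop m (i + 1) small big
    else pairLoop m (i + 1) small big
  else (small, big)
termination_by (m + 1 - i).toNat
decreasing_by
  all_goals
    have h2 : i ≤ m := by nlinarith [h.1, h.2]
    omega

def dell_alt (x : Int) : List Int :=
  if x ≤ 0 then []
  else
    let m := stripTwos x
    let p := pairLoop m 1 [] []
    let divs := p.1 ++ p.2.reverse
    divs.filter (fun d => decide (d ≠ 1 ∧ d ≠ x))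

-- ===== PRECONDITION & SPEC =====
-- Pre_ excludes x < 0, where A raises TypeError (int() of the complex value x**0.5).
def Pre_dell (x : Int) : Prop := 0 ≤ x
instance (x : Int) : Decidable (Pre_dell x) := by unfold Pre_dell; infer_instance
def pvWitness_dell : Int := (45)

def Spec_dell (x : Int) (out : List Int) : Prop := out = dell_alt x
instance (x : Int) (out : List Int) : Decidable (Spec_dell x out) := by unfold Spec_dell; infer_instance

-- ===== CLAIM (what is proved, stated in full; the proofs are below) =====
def Claim_equal_dell : Prop := ∀ (x : Int), Dom_dell x → Pre_dell x → Spec_dell x (dell x)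

-- ===== LEMMAS AND PROOFS =====

-- the per-iteration contribution of A's loop body
def gA (x i : Int) : List Int :=
  (if PySem.Int.mod x i = 0 ∧ PySem.Int.mod i 2 ≠ 0 then [i] else []) ++
  (if PySem.Int.mod x i = 0 ∧ i ≠ PySem.Int.floordiv x i ∧
      PySem.Int.mod (PySem.Int.floordiv x i) 2 ≠ 0 then [PySem.Int.floordiv x i] else [])

theorem mem_gA {x i a : Int} :
    a ∈ gA x i ↔
      (PySem.Int.mod x i = 0 ∧ PySem.Int.mod i 2 ≠ 0 ∧ a = i) ∨
      (PySem.Int.mod x i = 0 ∧ i ≠ PySem.Int.floordiv x i ∧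
        PySem.Int.mod (PySem.Int.floordiv x i) 2 ≠ 0 ∧ a = PySem.Int.floordiv x i) := by
  unfold gA
  split_ifs <;> simp_all

theorem le_sqrt_int {x i : Int} (hx : 0 ≤ x) (hi : 0 ≤ i) :
    i ≤ ((Nat.sqrt x.toNat : Nat) : Int) ↔ i * i ≤ x := by
  obtain ⟨n, rfl⟩ := Int.eq_ofNat_of_zero_le hx
  obtain ⟨m, rfl⟩ := Int.eq_ofNat_of_zero_le hi
  rw [Int.toNat_natCast]
  exact_mod_cast Nat.le_sqrt


theorem dell_eq_sorted (x : Int) :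
    dell x = PySem.List.sorted
      ((PySem.List.pyRange 2 (((Nat.sqrt x.toNat : Nat) : Int) + 1) 1).flatMap (gA x))
      (fun a => a) := by
  unfold dell
  have hbody : (fun (d : List Int) (i : Int) =>
      if PySem.Int.mod x i = 0 then
        let d := if PySem.Int.mod i 2 ≠ 0 then d ++ [i] else d
        if i ≠ PySem.Int.floordiv x i then
          if PySem.Int.mod (PySem.Int.floordiv x i) 2 ≠ 0 then d ++ [PySem.Int.floordiv x i]
          else d
        else d
      else d) = fun d i => d ++ gA x i := by
    funext acc i
    by_cases h1 : PySem.Int.mod x i = 0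
    · by_cases h3 : i ≠ PySem.Int.floordiv x i <;>
        simp [gA, h1, h3] <;> split_ifs <;> simp
    · simp [gA, h1]
  rw [hbody, PySem.List.foldl_append_eq_flatMap, List.nil_append]

theorem mem_D {x a : Int} (hx : 0 ≤ x) :
    a ∈ (PySem.List.pyRange 2 (((Nat.sqrt x.toNat : Nat) : Int) + 1) 1).flatMap (gA x) ↔
      3 ≤ a ∧ a < x ∧ a % 2 = 1 ∧ a ∣ x := by
  simp only [List.mem_flatMap, mem_gA, PySem.List.mem_pyRange_one]
  constructor
  · rintro ⟨i, ⟨h2i, hiub⟩, hcase⟩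
    have hii : i * i ≤ x := (le_sqrt_int hx (by omega)).1 (by omega)
    rcases hcase with ⟨hm, ho, rfl⟩ | ⟨hm, hne, ho, rfl⟩
    · have hdvd : a ∣ x := (PySem.Int.mod_eq_zero_iff_dvd x a).1 hm
      rw [PySem.Int.mod_eq_emod_of_pos (by norm_num : (0:Int) < 2)] at ho
      refine ⟨by omega, by nlinarith, by omega, hdvd⟩
    · have hdvd : i ∣ x := (PySem.Int.mod_eq_zero_iff_dvd x i).1 hm
      rw [PySem.Int.floordiv_eq_ediv_of_pos (by omega : (0:Int) < i)] at hne ho ⊢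
      rw [PySem.Int.mod_eq_emod_of_pos (by norm_num : (0:Int) < 2)] at ho
      have hxij : i * (x / i) = x := Int.mul_ediv_cancel' hdvd
      have hij : i ≤ x / i := (Int.le_ediv_iff_mul_le (by omega)).2 hii
      have hlt : i < x / i := lt_of_le_of_ne hij hne
      refine ⟨by omega, by nlinarith, by omega, ⟨i, by rw [mul_comm]; exact hxij.symm⟩⟩
  · rintro ⟨h3, hax, hodd, hdvd⟩
    by_cases hc : a * a ≤ x
    · refine ⟨a, ⟨by omega, by have := (le_sqrt_int hx (by omega : (0:Int) ≤ a)).2 hc; omega⟩,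
        Or.inl ⟨(PySem.Int.mod_eq_zero_iff_dvd x a).2 hdvd, ?_, rfl⟩⟩
      rw [PySem.Int.mod_eq_emod_of_pos (by norm_num : (0:Int) < 2)]
      omega
    · rw [not_le] at hc
      have hxa : a * (x / a) = x := Int.mul_ediv_cancel' hdvd
      have hi0 : 0 ≤ x / a := Int.ediv_nonneg hx (by omega)
      have hi2 : 2 ≤ x / a := by
        by_contra h
        have h1 : x / a ≤ 1 := by omega
        have h2 : a * (x / a) ≤ a * 1 := mul_le_mul_of_nonneg_left h1 (by omega)
        rw [mul_one] at h2
        omega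
      have hia : x / a < a :=
        lt_of_mul_lt_mul_left (a := a) (by rw [hxa]; exact hc) (by omega)
      have hii : (x / a) * (x / a) ≤ x := by
        have h1 : x / a * (x / a) ≤ x / a * a := mul_le_mul_of_nonneg_left (le_of_lt hia) (by omega)
        rw [mul_comm (x / a) a] at h1
        omega
      have hfd : x / (x / a) = a := by
        rw [Int.ediv_eq_iff_eq_mul_left (by omega) ⟨a, by rw [mul_comm]; exact hxa.symm⟩]
        exact hxa.symm
      refine ⟨x / a, ⟨by omega, by have := (le_sqrt_int hx hi0).2 hii; omega⟩,
        Or.inr ⟨(PySem.Int.mod_eq_zero_iff_dvd x (x / a)).2 ⟨a, by rw [mul_comm]; exact hxa.symm⟩, ?_, ?_, ?_⟩⟩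
      · rw [PySem.Int.floordiv_eq_ediv_of_pos (by omega : (0:Int) < x / a), hfd]
        omega
      · rw [PySem.Int.floordiv_eq_ediv_of_pos (by omega : (0:Int) < x / a), hfd,
          PySem.Int.mod_eq_emod_of_pos (by norm_num : (0:Int) < 2)]
        omega
      · rw [PySem.Int.floordiv_eq_ediv_of_pos (by omega : (0:Int) < x / a), hfd]

theorem gA_disjoint {x i j : Int} (h2 : 2 ≤ i) (hij : i < j) (hjj : j * j ≤ x) :
    List.Disjoint (gA x i) (gA x j) := by
  intro a hai haj
  rw [mem_gA] at hai haj
  have hii : i * i ≤ x := by nlinarith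
  rcases hai with ⟨hm, ho, rfl⟩ | ⟨hm, hne, ho, rfl⟩ <;>
    rcases haj with ⟨hm', ho', he⟩ | ⟨hm', hne', ho', he⟩
  · omega
  · -- i = x // j, but j ≤ x / j so x // j > i : contradiction
    have hdj : j ∣ x := (PySem.Int.mod_eq_zero_iff_dvd x j).1 hm'
    rw [PySem.Int.floordiv_eq_ediv_of_pos (by omega : (0:Int) < j)] at he
    have : j ≤ x / j := (Int.le_ediv_iff_mul_le (by omega)).2 hjj
    omega
  · -- x // i = j : then x = i * j and x / j = i, but j ≤ x / j
    have hdi : i ∣ x := (PySem.Int.mod_eq_zero_iff_dvd x i).1 hm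
    rw [PySem.Int.floordiv_eq_ediv_of_pos (by omega : (0:Int) < i)] at he hne
    have hxij : i * (x / i) = x := Int.mul_ediv_cancel' hdi
    have hxj : x / j = i := by
      rw [Int.ediv_eq_iff_eq_mul_left (by omega : j ≠ 0) ⟨i, by rw [← he, mul_comm]; exact hxij.symm⟩]
      rw [← he]
      exact hxij.symm
    have : j ≤ x / j := (Int.le_ediv_iff_mul_le (by omega)).2 hjj
    omega
  · -- x // i = x // j : cancel the common cofactor
    have hdi : i ∣ x := (PySem.Int.mod_eq_zero_iff_dvd x i).1 hm
    have hdj : j ∣ x := (PySem.Int.mod_eq_zero_iff_dvd x j).1 hm'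
    rw [PySem.Int.floordiv_eq_ediv_of_pos (by omega : (0:Int) < i)] at he hne
    rw [PySem.Int.floordiv_eq_ediv_of_pos (by omega : (0:Int) < j)] at he hne'
    have hxi : i * (x / i) = x := Int.mul_ediv_cancel' hdi
    have hxj : j * (x / j) = x := Int.mul_ediv_cancel' hdj
    have hci : i ≤ x / i := (Int.le_ediv_iff_mul_le (by omega)).2 hii
    have : i = j := by
      have h0 : (0:Int) < x / i := by omega
      have : i * (x / i) = j * (x / i) := by rw [hxi, he, hxj]
      exact mul_right_cancel₀ (by omega) this
    omega

theorem nodup_D {x : Int} (hx : 0 ≤ x) :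
    ((PySem.List.pyRange 2 (((Nat.sqrt x.toNat : Nat) : Int) + 1) 1).flatMap (gA x)).Nodup := by
  rw [List.nodup_flatMap]
  constructor
  · intro i hi
    rw [PySem.List.mem_pyRange_one] at hi
    unfold gA
    split_ifs with h1 h2 <;> simp_all
  · have hp : (PySem.List.pyRange 2 (((Nat.sqrt x.toNat : Nat) : Int) + 1) 1).Pairwise
        (fun i j => i ∈ PySem.List.pyRange 2 (((Nat.sqrt x.toNat : Nat) : Int) + 1) 1 ∧
          j ∈ PySem.List.pyRange 2 (((Nat.sqrt x.toNat : Nat) : Int) + 1) 1 ∧ i < j) :=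
      List.Pairwise.and_mem.1 (PySem.List.pairwise_lt_pyRange_one 2 _)
    refine hp.imp ?_
    rintro i j ⟨hi, hj, hij⟩
    rw [PySem.List.mem_pyRange_one] at hi hj
    have hjj : j * j ≤ x := (le_sqrt_int hx (by omega)).1 (by omega)
    exact gA_disjoint (by omega) hij hjj

-- ----- B-side lemmas -----

theorem odd_dvd_of_dvd_two_mul {d k : Int} (hodd : d % 2 = 1) (h : d ∣ 2 * k) : d ∣ k := by
  obtain ⟨c, hc⟩ := h
  have hce : c % 2 = 0 := by
    by_contra hco
    have hc1 : c % 2 = 1 := by omega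
    have h1 : (d * c) % 2 = 1 := by
      rw [Int.mul_emod, hodd, hc1]
      decide
    omega
  refine ⟨c / 2, ?_⟩
  have hcc : c = 2 * (c / 2) := by omega
  have h2 : d * c = 2 * (d * (c / 2)) := by
    nth_rewrite 1 [hcc]
    ring
  omega

theorem stripTwos_spec (m : Int) :
    1 ≤ m → 1 ≤ stripTwos m ∧ stripTwos m % 2 = 1 ∧ stripTwos m ∣ m ∧
      ∀ d : Int, d % 2 = 1 → (d ∣ stripTwos m ↔ d ∣ m) := by
  induction m using stripTwos.induct with
  | case1 m h ih =>
    intro hm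
    obtain ⟨h1, h2⟩ := h
    rw [PySem.Int.mod_eq_emod_of_pos (by norm_num : (0:Int) < 2)] at h2
    have hs : stripTwos m = stripTwos (PySem.Int.floordiv m 2) := by
      rw [stripTwos, dif_pos ⟨h1, by
        rw [PySem.Int.mod_eq_emod_of_pos (by norm_num : (0:Int) < 2)]; exact h2⟩]
    rw [PySem.Int.floordiv_eq_ediv_of_pos (by norm_num : (0:Int) < 2)] at hs ih
    obtain ⟨ih1, ih2, ih3, ih4⟩ := ih (by omega)
    have hhalf : m / 2 ∣ m := ⟨2, by omega⟩
    refine ⟨by rw [hs]; exact ih1, ?_, ?_, ?_⟩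
    · rw [hs]; exact ih2
    · rw [hs]; exact ih3.trans hhalf
    · intro d hd
      rw [hs, ih4 d hd]
      constructor
      · exact fun h => h.trans hhalf
      · intro h
        refine odd_dvd_of_dvd_two_mul hd ?_
        rw [show 2 * (m / 2) = m by omega]
        exact h
  | case2 m h =>
    intro hm
    have hs : stripTwos m = m := by
      rw [stripTwos, dif_neg h]
    rw [hs]
    rw [PySem.Int.mod_eq_emod_of_pos (by norm_num : (0:Int) < 2)] at h
    exact ⟨hm, by omega, dvd_refl m, fun d _ => Iff.rfl⟩

theorem pairLoop_spec (m : Int) (hm : 0 ≤ m) :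
    ∀ (i : Int) (s b : List Int), 1 ≤ i →
      pairLoop m i s b =
        (s ++ (PySem.List.pyRange i (((Nat.sqrt m.toNat : Nat) : Int) + 1) 1).filter
            (fun j => decide (PySem.Int.mod m j = 0)),
         b ++ ((PySem.List.pyRange i (((Nat.sqrt m.toNat : Nat) : Int) + 1) 1).filter
            (fun j => decide (PySem.Int.mod m j = 0 ∧ j * j ≠ m))).map
            (fun j => PySem.Int.floordiv m j)) := by
  intro i s b
  induction i, s, b using pairLoop.induct m with
  | case1 i s b h hmod s1 b1 ih =>
    intro hi
    simp only [s1, b1, dite_eq_ite] at ih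
    have hcons : PySem.List.pyRange i (((Nat.sqrt m.toNat : Nat) : Int) + 1) 1 =
        i :: PySem.List.pyRange (i + 1) (((Nat.sqrt m.toNat : Nat) : Int) + 1) 1 := by
      apply PySem.List.pyRange_one_cons
      have := (le_sqrt_int hm (by omega : (0:Int) ≤ i)).2 h.1
      omega
    rw [pairLoop]
    simp only [h, and_self, dite_true, hmod, if_true]
    rw [ih (by omega), hcons]
    simp only [List.filter_cons, hmod, decide_eq_true_eq]
    by_cases hne : i * i ≠ m <;>
      simp [hne, List.append_assoc]
  | case2 i s b h hmod ih =>
    intro hi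
    have hcons : PySem.List.pyRange i (((Nat.sqrt m.toNat : Nat) : Int) + 1) 1 =
        i :: PySem.List.pyRange (i + 1) (((Nat.sqrt m.toNat : Nat) : Int) + 1) 1 := by
      apply PySem.List.pyRange_one_cons
      have := (le_sqrt_int hm (by omega : (0:Int) ≤ i)).2 h.1
      omega
    rw [pairLoop]
    simp only [h, and_self, dite_true, hmod, if_false]
    rw [ih (by omega), hcons]
    simp [hmod]
  | case3 i s b h =>
    intro hi
    have hnil : PySem.List.pyRange i (((Nat.sqrt m.toNat : Nat) : Int) + 1) 1 = [] := by
      apply PySem.List.pyRange_one_eq_nil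
      by_contra hlt
      rw [not_le] at hlt
      have h2 : i ≤ ((Nat.sqrt m.toNat : Nat) : Int) := by omega
      exact h ⟨(le_sqrt_int hm (by omega)).1 h2, hi⟩
    rw [pairLoop]
    simp [h, hnil]

theorem mem_divs {m : Int} (hm : 1 ≤ m) (a : Int) :
    a ∈ (pairLoop m 1 [] []).1 ++ (pairLoop m 1 [] []).2.reverse ↔ 1 ≤ a ∧ a ∣ m := by
  rw [pairLoop_spec m (by omega) 1 [] [] (le_refl 1)]
  simp only [List.nil_append, List.mem_append, List.mem_reverse, List.mem_filter, List.mem_map,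
    PySem.List.mem_pyRange_one, decide_eq_true_eq]
  constructor
  · rintro (⟨⟨h1, _⟩, hmod⟩ | ⟨j, ⟨⟨hj1, hj2⟩, hmod, hne⟩, rfl⟩)
    · exact ⟨h1, (PySem.Int.mod_eq_zero_iff_dvd m a).1 hmod⟩
    · have hdvd : j ∣ m := (PySem.Int.mod_eq_zero_iff_dvd m j).1 hmod
      rw [PySem.Int.floordiv_eq_ediv_of_pos (by omega : (0:Int) < j)]
      have hxj : j * (m / j) = m := Int.mul_ediv_cancel' hdvd
      have hjj : j * j ≤ m := (le_sqrt_int (by omega) (by omega)).1 (by omega)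
      have hle : j ≤ m / j := (Int.le_ediv_iff_mul_le (by omega)).2 hjj
      exact ⟨by omega, ⟨j, by rw [mul_comm]; exact hxj.symm⟩⟩
  · rintro ⟨ha1, hdvd⟩
    by_cases hc : a * a ≤ m
    · left
      refine ⟨⟨ha1, ?_⟩, (PySem.Int.mod_eq_zero_iff_dvd m a).2 hdvd⟩
      have := (le_sqrt_int (by omega : (0:Int) ≤ m) (by omega : (0:Int) ≤ a)).2 hc
      omega
    · right
      rw [not_le] at hc
      have hxa : a * (m / a) = m := Int.mul_ediv_cancel' hdvd
      have hj0 : 1 ≤ m / a := by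
        by_cases h0 : m / a ≤ 0
        · exfalso
          have h1 : a * (m / a) ≤ a * 0 := mul_le_mul_of_nonneg_left h0 (by omega)
          rw [mul_zero] at h1
          omega
        · omega
      have hja : m / a < a := lt_of_mul_lt_mul_left (a := a) (by rw [hxa]; exact hc) (by omega)
      have hjj : (m / a) * (m / a) ≤ m := by
        have h1 : m / a * (m / a) ≤ m / a * a := mul_le_mul_of_nonneg_left (le_of_lt hja) (by omega)
        rw [mul_comm (m / a) a] at h1
        omega
      refine ⟨m / a, ⟨⟨by omega, ?_⟩,
        (PySem.Int.mod_eq_zero_iff_dvd m (m / a)).2 ⟨a, by rw [mul_comm]; exact hxa.symm⟩, ?_⟩, ?_⟩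
      · have := (le_sqrt_int (by omega : (0:Int) ≤ m) (by omega)).2 hjj
        omega
      · intro heq
        nlinarith [hxa, hja, hj0, heq]
      · rw [PySem.Int.floordiv_eq_ediv_of_pos (by omega : (0:Int) < m / a),
          Int.ediv_eq_iff_eq_mul_left (by omega) ⟨a, by rw [mul_comm]; exact hxa.symm⟩]
        exact hxa.symm

theorem cofactor_gt_sqrt {m j : Int} (hj : 1 ≤ j) (hdvd : j ∣ m) (hjr : j * j ≤ m)
    (hne : j * j ≠ m) : ((Nat.sqrt m.toNat : Nat) : Int) < m / j := by
  have hm : 0 ≤ m := by nlinarith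
  have haj : j * (m / j) = m := Int.mul_ediv_cancel' hdvd
  have hle : j ≤ m / j := (Int.le_ediv_iff_mul_le (by omega)).2 hjr
  have hlt : j < m / j := by
    rcases eq_or_lt_of_le hle with h | h
    · exfalso
      apply hne
      rw [← h] at haj
      exact haj
    · exact h
  by_contra hle2
  rw [not_lt] at hle2
  have h2 : (m / j) * (m / j) ≤ m := (le_sqrt_int hm (by omega)).1 hle2
  nlinarith [haj, hlt, h2]

theorem pairwise_divs {m : Int} (hm : 1 ≤ m) :
    ((pairLoop m 1 [] []).1 ++ (pairLoop m 1 [] []).2.reverse).Pairwise (· < ·) := by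
  rw [pairLoop_spec m (by omega) 1 [] [] (le_refl 1)]
  simp only [List.nil_append]
  rw [List.pairwise_append]
  refine ⟨List.Pairwise.filter _ (PySem.List.pairwise_lt_pyRange_one 1 _), ?_, ?_⟩
  · rw [List.pairwise_reverse, List.pairwise_map]
    have hpw := List.Pairwise.and_mem.1
      (List.Pairwise.filter (fun j => decide (PySem.Int.mod m j = 0 ∧ j * j ≠ m))
        (PySem.List.pairwise_lt_pyRange_one 1 (((Nat.sqrt m.toNat : Nat) : Int) + 1)))
    refine hpw.imp ?_
    rintro j j' ⟨hjmem, hj'mem, hlt⟩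
    have hjp := List.of_mem_filter hjmem
    have hj'p := List.of_mem_filter hj'mem
    simp only [decide_eq_true_eq] at hjp hj'p
    have hjr := (PySem.List.mem_pyRange_one).1 (List.mem_of_mem_filter hjmem)
    have hj'r := (PySem.List.mem_pyRange_one).1 (List.mem_of_mem_filter hj'mem)
    have hdj : j ∣ m := (PySem.Int.mod_eq_zero_iff_dvd m j).1 hjp.1
    have hdj' : j' ∣ m := (PySem.Int.mod_eq_zero_iff_dvd m j').1 hj'p.1
    rw [PySem.Int.floordiv_eq_ediv_of_pos (by omega : (0:Int) < j),
      PySem.Int.floordiv_eq_ediv_of_pos (by omega : (0:Int) < j')]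
    have haj : j * (m / j) = m := Int.mul_ediv_cancel' hdj
    have haj' : j' * (m / j') = m := Int.mul_ediv_cancel' hdj'
    have hjj : j * j ≤ m := (le_sqrt_int (by omega) (by omega)).1 (by omega)
    have hjj' : j' * j' ≤ m := (le_sqrt_int (by omega) (by omega)).1 (by omega)
    have h1 : j ≤ m / j := (Int.le_ediv_iff_mul_le (by omega)).2 hjj
    have h1' : j' ≤ m / j' := (Int.le_ediv_iff_mul_le (by omega)).2 hjj'
    by_contra hc
    rw [not_lt] at hc
    nlinarith [haj, haj', hlt, h1, h1', hc, hjr.1]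
  · intro a hamem bb hbmem
    have har := (PySem.List.mem_pyRange_one).1 (List.mem_of_mem_filter hamem)
    rw [List.mem_reverse] at hbmem
    obtain ⟨j, hjmem, rfl⟩ := List.mem_map.1 hbmem
    have hjp := List.of_mem_filter hjmem
    simp only [decide_eq_true_eq] at hjp
    have hjr := (PySem.List.mem_pyRange_one).1 (List.mem_of_mem_filter hjmem)
    have hdj : j ∣ m := (PySem.Int.mod_eq_zero_iff_dvd m j).1 hjp.1
    have hjj : j * j ≤ m := (le_sqrt_int (by omega) (by omega)).1 (by omega)
    have := cofactor_gt_sqrt (by omega : 1 ≤ j) hdj hjj hjp.2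
    rw [PySem.Int.floordiv_eq_ediv_of_pos (by omega : (0:Int) < j)]
    omega

theorem mem_alt {x d : Int} (hx : 0 ≤ x) :
    d ∈ dell_alt x ↔ 3 ≤ d ∧ d < x ∧ d % 2 = 1 ∧ d ∣ x := by
  by_cases h0 : x ≤ 0
  · have hx0 : x = 0 := by omega
    subst hx0
    rw [dell_alt]
    simp
    omega
  · obtain ⟨hm1, hmodd, hmdvd, hmiff⟩ := stripTwos_spec x (by omega)
    rw [dell_alt, if_neg h0]
    simp only [List.mem_filter, mem_divs hm1, decide_eq_true_eq]
    constructor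
    · rintro ⟨⟨hd1, hddvd⟩, hne1, hnex⟩
      have hdodd : d % 2 = 1 := by
        obtain ⟨c, hc⟩ := hddvd
        by_contra hde
        have hd0 : d % 2 = 0 := by omega
        have : stripTwos x % 2 = 0 := by
          rw [hc, Int.mul_emod, hd0]
          simp
        omega
      have hdx : d ∣ x := (hmiff d hdodd).1 hddvd
      have : d ≤ x := Int.le_of_dvd (by omega) hdx
      exact ⟨by omega, by omega, hdodd, hdx⟩
    · rintro ⟨h3, hlt, hodd, hdvd⟩
      exact ⟨⟨by omega, (hmiff d hodd).2 hdvd⟩, by omega, by omega⟩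

theorem pairwise_alt {x : Int} (hx : 0 ≤ x) : (dell_alt x).Pairwise (· < ·) := by
  by_cases h0 : x ≤ 0
  · have hx0 : x = 0 := by omega
    subst hx0
    rw [dell_alt]
    simp
  · obtain ⟨hm1, _, _, _⟩ := stripTwos_spec x (by omega)
    rw [dell_alt, if_neg h0]
    exact List.Pairwise.filter _ (pairwise_divs hm1)

theorem nodup_alt {x : Int} (hx : 0 ≤ x) : (dell_alt x).Nodup :=
  (pairwise_alt hx).imp ne_of_lt

-- ===== VERDICT (by name: the statement is the Claim_ definition above) =====
theorem dell_spec : Claim_equal_dell := by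
  intro x _ hx
  unfold Pre_dell at hx
  unfold Spec_dell
  rw [dell_eq_sorted]
  refine PySem.List.sorted_eq_of_perm_of_pairwise_lt _ _ (fun a => a) ?_ (pairwise_alt hx)
  rw [List.perm_ext_iff_of_nodup (nodup_alt hx) (nodup_D hx)]
  intro a
  rw [mem_alt hx, mem_D hx]
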